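-- pv_equiv track=rewrite | github.com/itaybaran/data_etl_kafka_job | utils/logger.py | get_error_code
-- ===== SOURCE A (Python) =====
-- def get_error_code(error_type):
--     default_code = "4011"
--     codes =  [{"AssertionError":4112},{"ValidatorError":4111},
--               {"DataExtractorError":4121},{"HL7ParserError":4131},
--               {"FilterError":4141},{"OperatorError":4151},
--               {"ExplodeError":4161},{"EnrichError":4171},
--                {"BindError":4181},{"ProduceError":4191}]
--     for element in codes:
--         for key in element:
--             if key == error_type:
--                 return str(element[error_type])
--     return default_code
-- ===== SOURCE B (Python) =====
-- NAMES = ("ValidatorError", "DataExtractorError", "HL7ParserError",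
--          "FilterError", "OperatorError", "ExplodeError",
--          "EnrichError", "BindError", "ProduceError")
--
-- def get_error_code(error_type):
--     # AssertionError breaks the arithmetic pattern; all other codes are 4111 + 10*i
--     if error_type == "AssertionError":
--         return "4112"
--     try:
--         i = NAMES.index(error_type)
--     except ValueError:
--         return "4011"
--     return str(4111 + 10 * i)
-- ===== Notes on version B (the rewrite author's own statement) =====
-- stated objective: alternative
-- what changed: Instead of storing every code in a table, B computes the code arithmetically as 4111 + 10*i from the error type's position in a fixed name sequence (with the one irregular case, AssertionError, handled first), replacing A's nested scan over single-key dicts.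
import Mathlib
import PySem

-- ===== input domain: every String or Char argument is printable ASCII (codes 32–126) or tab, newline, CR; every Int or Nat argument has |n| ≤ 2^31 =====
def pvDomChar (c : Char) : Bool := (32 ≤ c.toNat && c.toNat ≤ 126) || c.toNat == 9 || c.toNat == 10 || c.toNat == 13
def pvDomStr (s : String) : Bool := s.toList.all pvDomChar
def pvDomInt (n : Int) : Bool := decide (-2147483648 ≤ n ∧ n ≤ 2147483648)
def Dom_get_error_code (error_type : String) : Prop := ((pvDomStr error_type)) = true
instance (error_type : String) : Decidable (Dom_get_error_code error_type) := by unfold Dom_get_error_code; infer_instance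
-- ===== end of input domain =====

-- B computes the code arithmetically (4111 + 10*position in a fixed name list, AssertionError special-cased) instead of A's nested scan over a list of single-key code dicts.

-- ===== PORT A =====
-- inner loop 'for key in element: if key == error_type: return str(element[error_type])'
-- (the subscript cannot raise when the branch fires, since key == error_type ∈ element; getD 0 is that unreachable case)
def pvInnerA (error_type : String) (d : PySem.Dict String Int) : List String → Option String
  | [] => none
  | k :: ks => if k == error_type then some (PySem.Int.toStr ((d.get? error_type).getD 0)) else pvInnerA error_type d ks

-- outer loop 'for element in codes'
def pvOuterA (error_type : String) : List (PySem.Dict String Int) → Option String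
  | [] => none
  | d :: rest => match pvInnerA error_type d (PySem.Dict.keys d) with
    | some s => some s
    | none => pvOuterA error_type rest

def get_error_code (error_type : String) : String :=
  let default_code := "4011"
  let codes : List (PySem.Dict String Int) :=
    [PySem.Dict.ofList [("AssertionError", 4112)], PySem.Dict.ofList [("ValidatorError", 4111)],
     PySem.Dict.ofList [("DataExtractorError", 4121)], PySem.Dict.ofList [("HL7ParserError", 4131)],
     PySem.Dict.ofList [("FilterError", 4141)], PySem.Dict.ofList [("OperatorError", 4151)],
     PySem.Dict.ofList [("ExplodeError", 4161)], PySem.Dict.ofList [("EnrichError", 4171)],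
     PySem.Dict.ofList [("BindError", 4181)], PySem.Dict.ofList [("ProduceError", 4191)]]
  match pvOuterA error_type codes with
  | some s => s
  | none => default_code

-- ===== PORT B =====
def pvNamesB : List String :=
  ["ValidatorError", "DataExtractorError", "HL7ParserError",
   "FilterError", "OperatorError", "ExplodeError",
   "EnrichError", "BindError", "ProduceError"]

def get_error_code_alt (error_type : String) : String :=
  if error_type == "AssertionError" then "4112"
  else match PySem.List.index? pvNamesB error_type with
    | some i => PySem.Int.toStr (4111 + 10 * (i : Int))
    | none => "4011"

-- ===== PRECONDITION & SPEC =====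
def Spec_get_error_code (error_type : String) (out : String) : Prop := out = get_error_code_alt error_type
instance (error_type : String) (out : String) : Decidable (Spec_get_error_code error_type out) := by unfold Spec_get_error_code; infer_instance

-- ===== CLAIM =====
def Claim_equal_get_error_code : Prop := ∀ (error_type : String), Dom_get_error_code error_type → Spec_get_error_code error_type (get_error_code error_type)

-- ===== LEMMAS AND PROOFS =====

-- ===== VERDICT =====
theorem get_error_code_spec : Claim_equal_get_error_code := by
  intro s _
  by_cases h0 : s = "AssertionError"
  · subst h0; decide
  by_cases h1 : s = "ValidatorError"
  · subst h1; decide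
  by_cases h2 : s = "DataExtractorError"
  · subst h2; decide
  by_cases h3 : s = "HL7ParserError"
  · subst h3; decide
  by_cases h4 : s = "FilterError"
  · subst h4; decide
  by_cases h5 : s = "OperatorError"
  · subst h5; decide
  by_cases h6 : s = "ExplodeError"
  · subst h6; decide
  by_cases h7 : s = "EnrichError"
  · subst h7; decide
  by_cases h8 : s = "BindError"
  · subst h8; decide
  by_cases h9 : s = "ProduceError"
  · subst h9; decide
  unfold Spec_get_error_code get_error_code get_error_code_alt pvNamesB
  rw [PySem.List.index?_eq_idxOf?]
  simp [pvOuterA, pvInnerA, PySem.Dict.ofList, PySem.Dict.update, PySem.Dict.insert,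
        PySem.Dict.keys, PySem.Dict.empty, List.idxOf?, List.findIdx?_cons, beq_iff_eq,
        h0, h1, h2, h3, h4, h5, h6, h7, h8, h9,
        Ne.symm h0, Ne.symm h1, Ne.symm h2, Ne.symm h3, Ne.symm h4,
        Ne.symm h5, Ne.symm h6, Ne.symm h7, Ne.symm h8, Ne.symm h9]
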